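-- pv_equiv track=rewrite | github.com/ashee022/baekjoon | 백준/Gold/17251. 힘 겨루기/힘 겨루기.py | win_team
-- ===== SOURCE A (Python) =====
-- def win_team(N, team_list):
--     max_from_left = [team_list[0]]
--     for i in range(1, N):
--         max_from_left.append(max(max_from_left[i-1], team_list[i]))
--
--     max_from_right = [team_list[-1]]
--     for i in range(N-2, -1, -1):
--         max_from_right.append(max(max_from_right[-1], team_list[i]))
--     max_from_right.reverse()
--
--     win_red = 0
--     win_blue = 0
--
--     for i in range(N-1):
--         red_strong = max_from_left[i]
--         blue_strong = max_from_right[i+1]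
--
--         if red_strong > blue_strong:
--             win_red += 1
--         elif blue_strong > red_strong:
--             win_blue += 1
--
--     if win_red > win_blue:
--         return "R"
--     elif win_blue > win_red:
--         return "B"
--     else:
--         return "X"
-- ===== SOURCE B (Python) =====
-- def win_team(N, team_list):
--     if N < 2:
--         return "X"                # fewer than two fighters: no split point to judge
--     # scan right to left from the last fighter, tracking the strongest fighter
--     # and the first/last position where that strength occurs
--     m = team_list[-1]
--     first = last = N - 1
--     for i in range(N - 2, -1, -1):
--         v = team_list[i]
--         if v > m:
--             m = v
--             first = last = i
--         elif v == m:
--             first = i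
--     win_blue = first              # splits before the first maximum: it stays on the right
--     win_red = (N - 1) - last      # splits at or after the last maximum: it moved left
--     if win_red > win_blue:
--         return "R"
--     elif win_blue > win_red:
--         return "B"
--     else:
--         return "X"
-- ===== Notes on version B (the rewrite author's own statement) =====
-- stated objective: simpler
-- what changed: B replaces A's two scan arrays (prefix maxima, reversed suffix maxima) and the per-split counting loop by one right-to-left pass that finds the maximum strength with the first and last position where it occurs; the win counts are then just first and (N-1)-last, and N < 2 returns 'X' directly since no split point exists.
import Mathlib
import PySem

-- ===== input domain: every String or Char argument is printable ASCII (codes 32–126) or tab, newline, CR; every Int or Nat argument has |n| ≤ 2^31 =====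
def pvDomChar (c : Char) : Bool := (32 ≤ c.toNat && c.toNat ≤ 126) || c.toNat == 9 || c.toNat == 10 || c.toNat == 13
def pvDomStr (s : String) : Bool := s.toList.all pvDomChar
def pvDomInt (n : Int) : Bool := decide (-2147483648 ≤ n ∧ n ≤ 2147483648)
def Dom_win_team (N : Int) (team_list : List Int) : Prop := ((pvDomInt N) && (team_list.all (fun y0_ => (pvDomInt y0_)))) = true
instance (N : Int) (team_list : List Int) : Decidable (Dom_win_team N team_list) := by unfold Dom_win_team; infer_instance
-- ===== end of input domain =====

-- B replaces A's two scan arrays (prefix/suffix maxima) and counting loop by one right-to-left pass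
-- finding the maximum with its first and last position; the win counts are then first and (N-1)-last. (simpler)

-- ===== PORT A =====
def win_team (N : Int) (team_list : List Int) : String :=
  let mfl := (PySem.List.pyRange 1 N 1).foldl
    (fun acc i => acc ++ [max (PySem.List.pyGetD acc (i-1) 0) (PySem.List.pyGetD team_list i 0)])
    [PySem.List.pyGetD team_list 0 0]
  let mfr0 := (PySem.List.pyRange (N-2) (-1) (-1)).foldl
    (fun acc i => acc ++ [max (PySem.List.pyGetD acc (-1) 0) (PySem.List.pyGetD team_list i 0)])
    [PySem.List.pyGetD team_list (-1) 0]
  let mfr := mfr0.reverse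
  let wins := (PySem.List.pyRange 0 (N-1) 1).foldl
    (fun (w : Int × Int) i =>
      if PySem.List.pyGetD mfl i 0 > PySem.List.pyGetD mfr (i+1) 0 then (w.1 + 1, w.2)
      else if PySem.List.pyGetD mfr (i+1) 0 > PySem.List.pyGetD mfl i 0 then (w.1, w.2 + 1)
      else w) (0, 0)
  if wins.1 > wins.2 then "R" else if wins.2 > wins.1 then "B" else "X"

-- ===== PORT B =====
def win_team_alt (N : Int) (team_list : List Int) : String :=
  if N < 2 then "X" else
  let s := (PySem.List.pyRange (N-2) (-1) (-1)).foldl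
    (fun (s : Int × Int × Int) i =>
      let v := PySem.List.pyGetD team_list i 0
      if v > s.1 then (v, i, i)
      else if v = s.1 then (s.1, i, s.2.2)
      else s)
    (PySem.List.pyGetD team_list (-1) 0, N - 1, N - 1)
  let win_blue := s.2.1
  let win_red := (N - 1) - s.2.2
  if win_red > win_blue then "R" else if win_blue > win_red then "B" else "X"

-- ===== PRECONDITION & SPEC =====
-- Pre_ is exactly where the Python A returns normally: a nonempty list (else team_list[0] raises
-- IndexError) and N ≤ len(team_list) (else the first loop reads team_list[N-1] out of range).
def Pre_win_team (N : Int) (team_list : List Int) : Prop :=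
  team_list ≠ [] ∧ N ≤ (team_list.length : Int)
instance (N : Int) (team_list : List Int) : Decidable (Pre_win_team N team_list) := by
  unfold Pre_win_team; infer_instance
def pvWitness_win_team : Int × List Int := (4, [2, 5, 1, 5])
def Spec_win_team (N : Int) (team_list : List Int) (out : String) : Prop := out = win_team_alt N team_list
instance (N : Int) (team_list : List Int) (out : String) : Decidable (Spec_win_team N team_list out) := by unfold Spec_win_team; infer_instance

-- ===== CLAIM (what is proved, stated in full; the proofs are below) =====
def Claim_equal_win_team : Prop := ∀ (N : Int) (team_list : List Int), Dom_win_team N team_list → Pre_win_team N team_list → Spec_win_team N team_list (win_team N team_list)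

-- ===== LEMMAS AND PROOFS =====

-- running-max tail: pvG m ys lists the running maxima of m over successive prefixes of ys
def pvG : Int → List Int → List Int
  | _, [] => []
  | m, y :: ys => max m y :: pvG (max m y) ys

-- max of a nonempty list (0 on [])
def pvNmax : List Int → Int
  | [] => 0
  | x :: xs => xs.foldl max x

lemma pvG_length (m : Int) (ys : List Int) : (pvG m ys).length = ys.length := by
  induction ys generalizing m with
  | nil => rfl
  | cons y ys ih => simp [pvG, ih]

lemma pvG_getD (ys : List Int) : ∀ (m : Int) (i : Nat), i ≤ ys.length →
    (m :: pvG m ys).getD i 0 = (ys.take i).foldl max m := by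
  induction ys with
  | nil => intro m i hi; have h0 : i = 0 := Nat.le_zero.mp hi; subst h0; rfl
  | cons y ys ih =>
    intro m i hi
    cases i with
    | zero => simp
    | succ j =>
      have := ih (max m y) j (by simpa using hi)
      simpa [pvG, List.take_succ_cons] using this

lemma pvFoldlMax_swap (l : List Int) : ∀ (m x : Int),
    l.foldl max (max m x) = max (l.foldl max m) x := by
  induction l with
  | nil => intro m x; rfl
  | cons y l ih =>
    intro m x
    simp only [List.foldl_cons]
    rw [max_right_comm, ih]

lemma pvFoldlMax_append_singleton (l : List Int) (c : Int) :
    l.foldl max c = pvNmax (l ++ [c]) := by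
  cases l with
  | nil => rfl
  | cons y l =>
    simp only [List.cons_append, pvNmax, List.foldl_append, List.foldl_cons, List.foldl_nil]
    rw [max_comm c y, pvFoldlMax_swap]

lemma pvNmax_append (a b : List Int) (ha : a ≠ []) (hb : b ≠ []) :
    pvNmax (a ++ b) = max (pvNmax a) (pvNmax b) := by
  obtain ⟨x, a', rfl⟩ := List.exists_cons_of_ne_nil ha
  obtain ⟨y, b', rfl⟩ := List.exists_cons_of_ne_nil hb
  simp only [pvNmax, List.cons_append, List.foldl_append, List.foldl_cons]
  rw [max_comm _ y, pvFoldlMax_swap, max_comm]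

lemma pvLastD_eq_getElem (l : List Int) (h : l ≠ []) :
    l.getLastD 0 = l[l.length - 1]'(by
      have := List.length_pos_iff.mpr h; omega) := by
  rw [List.getLastD_eq_getLast?, List.getLast?_eq_some_getLast h, Option.getD_some,
    List.getLast_eq_getElem]

lemma pvGetD_last (l : List Int) (h : l ≠ []) (i : Int) (hi : i = (l.length : Int) - 1) :
    PySem.List.pyGetD l i 0 = l.getLastD 0 := by
  have hlen := List.length_pos_iff.mpr h
  rw [PySem.List.pyGetD_eq_getElem l 0 (by omega) (by omega), pvLastD_eq_getElem l h]
  congr 1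
  omega

-- A's left scan: folding the body over range s..e starting from acc (length s) appends pvG
lemma pvFoldLeft (t : List Int) : ∀ (c : Nat) (s e : Int), e - s = c → ∀ (acc : List Int), acc ≠ [] →
    (acc.length : Int) = s →
    (PySem.List.pyRange s e 1).foldl
      (fun acc i => acc ++ [max (PySem.List.pyGetD acc (i-1) 0) (PySem.List.pyGetD t i 0)]) acc
    = acc ++ pvG (acc.getLastD 0)
        ((PySem.List.pyRange s e 1).map (fun j => PySem.List.pyGetD t j 0)) := by
  intro c
  induction c with
  | zero =>
    intro s e hc acc h hlen
    rw [PySem.List.pyRange_one_eq_nil (by omega)]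
    simp [pvG]
  | succ c ih =>
    intro s e hc acc h hlen
    rw [PySem.List.pyRange_one_cons (by omega)]
    simp only [List.foldl_cons, List.map_cons, pvG]
    rw [pvGetD_last acc h (s - 1) (by omega)]
    rw [ih (s+1) e (by omega) _ (by simp) (by simp; omega)]
    simp

-- A's right scan: acc[-1] is the last element, so the fold appends pvG of the visited values
lemma pvFoldRight (t : List Int) : ∀ (js : List Int) (acc : List Int), acc ≠ [] →
    js.foldl (fun acc i => acc ++ [max (PySem.List.pyGetD acc (-1) 0) (PySem.List.pyGetD t i 0)]) acc
    = acc ++ pvG (acc.getLastD 0) (js.map (fun j => PySem.List.pyGetD t j 0)) := by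
  intro js
  induction js with
  | nil => intro acc h; simp [pvG]
  | cons j js ih =>
    intro acc h
    simp only [List.foldl_cons, List.map_cons, pvG]
    have hlast : PySem.List.pyGetD acc (-1) 0 = acc.getLastD 0 := by
      have hlen := List.length_pos_iff.mpr h
      rw [PySem.List.pyGetD_neg_one acc 0 h]
      rw [pvLastD_eq_getElem acc h, List.getLast_eq_getElem]
    rw [hlast, ih _ (by simp)]
    simp

-- A's counting loop is a pair of countP's
lemma pvCountFold (f g : Int → Int) : ∀ (js : List Int) (a b : Int),
    js.foldl (fun (w : Int × Int) i =>
      if f i > g i then (w.1 + 1, w.2)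
      else if g i > f i then (w.1, w.2 + 1)
      else w) (a, b)
    = (a + (js.countP (fun i => decide (g i < f i)) : Int),
       b + (js.countP (fun i => decide (f i < g i)) : Int)) := by
  intro js
  induction js with
  | nil => intro a b; simp
  | cons j js ih =>
    intro a b
    simp only [List.foldl_cons, List.countP_cons]
    rcases lt_trichotomy (f j) (g j) with h1 | h1 | h1
    · rw [if_neg (by omega), if_pos (by omega), ih]
      simp only [Prod.mk.injEq]
      refine ⟨?_, ?_⟩ <;> simp [h1, not_lt_of_gt h1] <;> omega
    · rw [if_neg (by omega), if_neg (by omega), ih]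
      simp only [Prod.mk.injEq]
      refine ⟨?_, ?_⟩ <;> simp [h1] <;> omega
    · rw [if_pos (by omega), ih]
      simp only [Prod.mk.injEq]
      refine ⟨?_, ?_⟩ <;> simp [h1, not_lt_of_gt h1] <;> omega

-- blue wins (splits strictly left of the first maximum) counted as indices where the prefix max is short
def pvCntL (u : List Int) : Nat :=
  (List.range u.length).countP (fun i => decide (pvNmax (u.take (i+1)) ≠ pvNmax u))
-- red wins counted as indices where the suffix max is short
def pvCntR (u : List Int) : Nat :=
  (List.range u.length).countP (fun i => decide (pvNmax (u.drop i) ≠ pvNmax u))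

lemma pvFoldlMax_reverse (l : List Int) : ∀ (c : Int), l.reverse.foldl max c = l.foldl max c := by
  induction l with
  | nil => intro c; rfl
  | cons y l ih =>
    intro c
    simp only [List.reverse_cons, List.foldl_append, List.foldl_cons, List.foldl_nil, ih]
    rw [pvFoldlMax_swap]

lemma pvMapRangeGetD (l : List Int) (i : Nat) (h : i ≤ l.length) :
    (List.range i).map (fun j => l.getD j 0) = l.take i := by
  apply List.ext_getElem
  · simp; omega
  · intro j h1 h2
    simp only [List.getElem_map, List.getElem_range, List.getElem_take]
    rw [List.getD_eq_getElem l 0 (by simp at h1; omega)]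

lemma pvNmax_take_le (w : List Int) (i : Nat) (hw : w ≠ []) :
    pvNmax (w.take (i+1)) ≤ pvNmax w := by
  by_cases h : w.length ≤ i + 1
  · rw [List.take_of_length_le h]
  · conv_rhs => rw [← List.take_append_drop (i+1) w]
    rw [pvNmax_append _ _ (by simp [List.take_eq_nil_iff, hw]) (by simp [List.drop_eq_nil_iff]; omega)]
    exact le_max_left _ _

lemma pvNmax_drop_le (w : List Int) (i : Nat) (h : w.drop i ≠ []) :
    pvNmax (w.drop i) ≤ pvNmax w := by
  cases i with
  | zero => simp
  | succ j =>
    have hw : w ≠ [] := by intro hh; rw [hh] at h; simp at h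
    conv_rhs => rw [← List.take_append_drop (j+1) w]
    rw [pvNmax_append _ _ (by simp [List.take_eq_nil_iff, hw]) h]
    exact le_max_right _ _

lemma pvMaxNe (a b M : Int) (hb : b < M) : max a b ≠ M ↔ a ≠ M := by
  have h1 := le_max_left a b
  have h2 := le_max_right a b
  rcases max_choice a b with h | h <;> rw [h] at h1 h2 ⊢ <;> constructor <;> intro <;> omega

lemma pvNmax_cons (x : Int) (v : List Int) (hv : v ≠ []) :
    pvNmax (x :: v) = max x (pvNmax v) := by
  obtain ⟨y, v', rfl⟩ := List.exists_cons_of_ne_nil hv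
  simp only [pvNmax, List.foldl_cons]
  rw [max_comm x y, pvFoldlMax_swap, max_comm]

-- first-argmax recurrence: prepending x resets the count iff x attains the new maximum
lemma pvCntL_cons (x : Int) (v : List Int) (hv : v ≠ []) :
    pvCntL (x :: v) = if pvNmax v ≤ x then 0 else pvCntL v + 1 := by
  have htake : ∀ j : Nat, j < v.length →
      pvNmax ((x :: v).take (j + 1 + 1)) = max x (pvNmax (v.take (j + 1))) := by
    intro j hj
    rw [List.take_succ_cons, pvNmax_cons x _ (by simp [List.take_eq_nil_iff, hv])]
  by_cases hx : pvNmax v ≤ x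
  · rw [if_pos hx]
    have hmax : pvNmax (x :: v) = x := by
      rw [pvNmax_cons x v hv, max_eq_left hx]
    unfold pvCntL
    apply List.countP_eq_zero.mpr
    intro i hi
    have hi' : i < v.length + 1 := by simpa using List.mem_range.mp hi
    simp only [decide_eq_true_eq, ne_eq, not_not]
    cases i with
    | zero => rw [hmax]; rfl
    | succ j =>
      rw [htake j (by omega), hmax]
      have := pvNmax_take_le v j hv
      omega
  · rw [if_neg hx]
    have hxlt : x < pvNmax v := by omega
    have hmax : pvNmax (x :: v) = pvNmax v := by
      rw [pvNmax_cons x v hv, max_eq_right (by omega)]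
    unfold pvCntL
    rw [(by simp : (x :: v).length = v.length + 1), List.range_succ_eq_map,
        List.countP_cons, List.countP_map]
    have h0 : (if decide (pvNmax ((x :: v).take (0+1)) ≠ pvNmax (x :: v)) = true
        then 1 else 0) = 1 := by
      rw [show pvNmax ((x :: v).take (0+1)) = x from rfl, hmax]
      simp [ne_of_lt hxlt]
    rw [h0]
    congr 1
    apply List.countP_congr
    intro j hj
    have hj' : j < v.length := List.mem_range.mp hj
    simp only [Function.comp_apply, Nat.succ_eq_add_one, decide_eq_true_eq]
    rw [htake j hj', hmax, max_comm]
    exact pvMaxNe _ _ _ hxlt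

-- last-argmax recurrence: prepending x empties the missing-suffix count iff x beats the maximum
lemma pvCntR_cons (x : Int) (v : List Int) (hv : v ≠ []) :
    pvCntR (x :: v) = if pvNmax v < x then v.length else pvCntR v := by
  have hdrop : ∀ j : Nat, (x :: v).drop (j + 1) = v.drop j := fun j => rfl
  unfold pvCntR
  rw [(by simp : (x :: v).length = v.length + 1), List.range_succ_eq_map,
      List.countP_cons, List.countP_map]
  have h0 : (if decide (pvNmax ((x :: v).drop 0) ≠ pvNmax (x :: v)) = true
      then 1 else 0) = 0 := by
    simp
  rw [h0, Nat.add_zero]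
  by_cases hx : pvNmax v < x
  · rw [if_pos hx]
    have hmax : pvNmax (x :: v) = x := by
      rw [pvNmax_cons x v hv, max_eq_left (by omega)]
    rw [List.countP_eq_length.mpr, List.length_range]
    intro j hj
    have hj' : j < v.length := List.mem_range.mp hj
    simp only [Function.comp_apply, Nat.succ_eq_add_one, decide_eq_true_eq]
    rw [hdrop j, hmax]
    have := pvNmax_drop_le v j (by simp [List.drop_eq_nil_iff]; omega)
    omega
  · rw [if_neg hx]
    have hmax : pvNmax (x :: v) = pvNmax v := by
      rw [pvNmax_cons x v hv, max_eq_right (by omega)]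
    apply List.countP_congr
    intro j hj
    simp only [Function.comp_apply, Nat.succ_eq_add_one, decide_eq_true_eq]
    rw [hdrop j, hmax]

-- a right-to-left pass over (index, value) pairs computes (max, first argmax, last argmax)
lemma pvMainRev : ∀ (v : List Int), v ≠ [] → ∀ (s : Int),
    ((PySem.List.enumerate v s).reverse).foldl
      (fun (st : Int × Int × Int) p =>
        if p.2 > st.1 then (p.2, p.1, p.1)
        else if p.2 = st.1 then (st.1, p.1, st.2.2)
        else st)
      (v.getLastD 0, s + (v.length : Int) - 1, s + (v.length : Int) - 1)
    = (pvNmax v, s + (pvCntL v : Int), s + (v.length : Int) - 1 - (pvCntR v : Int)) := by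
  intro v
  induction v with
  | nil => intro h; exact absurd rfl h
  | cons a v ih =>
    intro _ s
    rcases eq_or_ne v [] with rfl | hv
    · simp [PySem.List.enumerate_cons, PySem.List.enumerate_nil, pvCntL, pvCntR, pvNmax,
        List.range_succ]
    · have hgl : (a :: v).getLastD 0 = v.getLastD 0 := by
        rw [List.getLastD_cons, List.getLastD_eq_getLast?, List.getLastD_eq_getLast?,
            List.getLast?_eq_some_getLast hv, Option.getD_some, Option.getD_some]
      have hlenc : ((a :: v).length : Int) = (v.length : Int) + 1 := by push_cast [List.length_cons]; ring
      rw [PySem.List.enumerate_cons, List.reverse_cons, List.foldl_append, hgl, hlenc,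
          show s + ((v.length : Int) + 1) - 1 = (s + 1) + (v.length : Int) - 1 from by ring,
          ih hv (s + 1), List.foldl_cons, List.foldl_nil]
      rcases lt_trichotomy a (pvNmax v) with ha | ha | ha
      · rw [if_neg (by simpa using not_lt_of_gt ha), if_neg (by simpa using ne_of_lt ha),
            pvNmax_cons a v hv, max_eq_right (le_of_lt ha),
            pvCntL_cons a v hv, if_neg (by omega), pvCntR_cons a v hv, if_neg (by omega)]
        rw [Prod.mk.injEq, Prod.mk.injEq]
        refine ⟨rfl, ?_, ?_⟩ <;> push_cast <;> ring
      · rw [if_neg (by simp [ha]), if_pos (by simpa using ha),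
            pvNmax_cons a v hv, max_eq_right (le_of_eq ha),
            pvCntL_cons a v hv, if_pos (le_of_eq ha.symm), pvCntR_cons a v hv, if_neg (by omega)]
        rw [Prod.mk.injEq, Prod.mk.injEq]
        refine ⟨rfl, ?_, ?_⟩ <;> push_cast <;> ring
      · rw [if_pos (by simpa using ha),
            pvNmax_cons a v hv, max_eq_left (le_of_lt ha),
            pvCntL_cons a v hv, if_pos (le_of_lt ha), pvCntR_cons a v hv, if_pos ha]
        rw [Prod.mk.injEq, Prod.mk.injEq]
        refine ⟨rfl, ?_, ?_⟩ <;> push_cast <;> ring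

-- B's backward index loop over N-2..0, seeded at the last fighter, is the pvMainRev pass over u
lemma pvAltB (t : List Int) (N : Int) (k : Nat) (u : List Int) (b : Int)
    (hkN : (k : Int) = N - 1) (hkl : k < t.length)
    (hu : u = t.take k ++ [b]) :
    (PySem.List.pyRange (N-2) (-1) (-1)).foldl
      (fun (s : Int × Int × Int) i =>
        if PySem.List.pyGetD t i 0 > s.1 then (PySem.List.pyGetD t i 0, i, i)
        else if PySem.List.pyGetD t i 0 = s.1 then (s.1, i, s.2.2)
        else s)
      (b, N - 1, N - 1)
    = (pvNmax u, (pvCntL u : Int), (N - 1) - (pvCntR u : Int)) := by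
  have htklen : (t.take k).length = k := by simp; omega
  have hune : u ≠ [] := by rw [hu]; simp
  have hulen : u.length = k + 1 := by rw [hu]; simp [htklen]
  have hlastu : u.getLastD 0 = b := by
    rw [hu, List.getLastD_eq_getLast?, List.getLast?_append, List.getLast?_singleton]
    rfl
  have hNk : ((u.length : Int)) = N := by rw [hulen]; push_cast; omega
  have hmain := pvMainRev u hune 0
  rw [PySem.List.enumerate_eq_map_pyRange u 0] at hmain
  simp only [PySem.List.len_eq] at hmain
  rw [hNk, show PySem.List.pyRange 0 N 1 = PySem.List.pyRange 0 (N-1) 1 ++ [N-1] from by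
        have h := PySem.List.pyRange_one_succ_right (a := 0) (b := N-1) (by omega)
        rw [show N - 1 + 1 = N from by ring] at h
        exact h] at hmain
  rw [List.map_append, List.reverse_append, List.map_cons, List.map_nil, List.reverse_cons,
      List.reverse_nil, List.nil_append, List.singleton_append, List.foldl_cons] at hmain
  have hgu : PySem.List.pyGetD u (N-1) 0 = b := by
    rw [pvGetD_last u hune (N-1) (by rw [hulen]; push_cast; omega), hlastu]
  rw [hgu, hlastu] at hmain
  rw [show (0 : Int) + N - 1 = N - 1 from by ring] at hmain
  simp only [gt_iff_lt, lt_irrefl, if_false, if_true] at hmain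
  rw [← List.map_reverse, List.foldl_map] at hmain
  rw [PySem.List.pyRange_neg_one_eq_reverse,
      show (-1 : Int) + 1 = 0 from by ring, show N - 2 + 1 = N - 1 from by ring]
  rw [show (0 : Int) + (pvCntL u : Int) = (pvCntL u : Int) from by ring] at hmain
  rw [← hmain]
  apply PySem.List.foldl_congr_mem
  intro acc x hx
  have hx' : 0 ≤ x ∧ x < N - 1 := by
    rw [List.mem_reverse, PySem.List.mem_pyRange_one] at hx
    omega
  have hval : PySem.List.pyGetD t x 0 = PySem.List.pyGetD u x 0 := by
    have hxx : x = ((x.toNat : Nat) : Int) := by omega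
    have hxk : x.toNat < k := by omega
    rw [hxx, PySem.List.pyGetD_natCast, PySem.List.pyGetD_natCast, hu,
        List.getD_eq_getElem _ 0 (by omega),
        List.getD_eq_getElem _ 0 (by simp [htklen]; omega),
        List.getElem_append_left (by omega)]
    simp
  simp [hval]

lemma pvCmp (P S M : Int) (h : max P S = M) : (S < P ↔ S ≠ M) ∧ (P < S ↔ P ≠ M) := by
  have h1 := le_max_left P S
  have h2 := le_max_right P S
  rcases max_choice P S with hc | hc <;> rw [hc] at h1 h2 <;>
    constructor <;> constructor <;> intro hx <;> omega

-- the prefix-max at index i < t.length, as A's left scan produces it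
lemma pvPrefEl (t : List Int) (i : Nat) (hi : i < t.length) :
    ((List.range i).map (fun j => t.getD (j+1) 0)).foldl max (t.getD 0 0) = pvNmax (t.take (i+1)) := by
  have hne : t ≠ [] := by intro hh; rw [hh] at hi; simp at hi
  obtain ⟨x, t', rfl⟩ := List.exists_cons_of_ne_nil hne
  rw [show (fun j => (x :: t').getD (j+1) 0) = (fun j => t'.getD j 0) from rfl,
      pvMapRangeGetD t' i (by simp at hi; omega), List.take_succ_cons]
  rfl

lemma pvCntR_shift (u : List Int) (k : Nat) (h : u.length = k + 1) :
    pvCntR u = (List.range k).countP (fun j => decide (pvNmax (u.drop (j+1)) ≠ pvNmax u)) := by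
  unfold pvCntR
  rw [h, List.range_succ_eq_map, List.countP_cons, List.countP_map]
  simp [Function.comp_def, Nat.succ_eq_add_one]

lemma pvCntL_shift (u : List Int) (k : Nat) (h : u.length = k + 1) :
    pvCntL u = (List.range k).countP (fun j => decide (pvNmax (u.take (j+1)) ≠ pvNmax u)) := by
  unfold pvCntL
  rw [h, List.range_succ, List.countP_append]
  simp [List.take_of_length_le (le_of_eq h)]

-- ===== VERDICT (by name: the statement is the Claim_ definition above) =====
theorem win_team_spec : Claim_equal_win_team := by
  intro N t _ hpre
  obtain ⟨hne, hNle⟩ := hpre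
  have hlpos : 0 < t.length := List.length_pos_iff.mpr hne
  unfold Spec_win_team
  simp only [win_team, win_team_alt]
  by_cases hN2 : N < 2
  · rw [if_pos hN2,
        PySem.List.pyRange_one_eq_nil (show N ≤ 1 by omega),
        PySem.List.pyRange_neg_one_eq_nil (show N - 2 ≤ -1 by omega),
        PySem.List.pyRange_one_eq_nil (show N - 1 ≤ 0 by omega)]
    norm_num
  rw [if_neg hN2]
  have hN1 : 1 ≤ N := by omega
  set k := (N - 1).toNat with hk
  have hkN : (k : Int) = N - 1 := by omega
  have hkl : k < t.length := by omega
  set x0 := PySem.List.pyGetD t 0 0 with hx0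
  set last' := PySem.List.pyGetD t (-1) 0 with hlast'
  set u : List Int := t.take k ++ [last'] with hu
  have htklen : (t.take k).length = k := by simp; omega
  have hulen : u.length = k + 1 := by rw [hu]; simp [htklen]
  have hune : u ≠ [] := by rw [hu]; simp
  -- A's scans
  have hmfl := pvFoldLeft t k 1 N (by omega) [x0] (by simp) (by simp)
  rw [show ([x0] : List Int).getLastD 0 = x0 from rfl] at hmfl
  rw [hmfl]
  have hmfr := pvFoldRight t (PySem.List.pyRange (N-2) (-1) (-1)) [last'] (by simp)
  rw [show ([last'] : List Int).getLastD 0 = last' from rfl] at hmfr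
  rw [hmfr]
  set vs := (PySem.List.pyRange 1 N 1).map (fun j => PySem.List.pyGetD t j 0) with hvsdef
  set vsR := (PySem.List.pyRange (N-2) (-1) (-1)).map (fun j => PySem.List.pyGetD t j 0) with hvsRdef
  have hvslen : vs.length = k := by
    rw [hvsdef, List.length_map, PySem.List.length_pyRange_one]
  have hvsR : vsR = (t.take k).reverse := by
    rw [hvsRdef, PySem.List.pyRange_neg_one_eq_reverse, List.map_reverse]
    congr 1
    rw [show (-1 : Int) + 1 = 0 from by ring, show (N - 2 : Int) + 1 = N - 1 from by ring,
        PySem.List.pyRange_zero, List.map_map, show (N - (1:Int)).toNat = k from by rw [hk]]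
    rw [show ((fun j => PySem.List.pyGetD t j 0) ∘ fun m : Nat => (m : Int))
          = (fun j : Nat => t.getD j 0) from funext fun j => by
        simp [PySem.List.pyGetD_natCast]]
    exact pvMapRangeGetD t k (le_of_lt hkl)
  -- element facts
  have hvsRlen : vsR.length = k := by rw [hvsR, List.length_reverse, htklen]
  have hvsEq : vs = (List.range k).map (fun j => t.getD (j+1) 0) := by
    rw [hvsdef, PySem.List.pyRange_one, List.map_map,
        show (N - (1:Int)).toNat = k from by rw [hk]]
    apply List.map_congr_left
    intro j hj
    simp only [Function.comp_apply]
    rw [show (1 : Int) + (j : Int) = ((j + 1 : Nat) : Int) from by push_cast; ring,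
        PySem.List.pyGetD_natCast]
  have hmflel : ∀ i : Nat, i < k →
      ([x0] ++ pvG x0 vs).getD i 0 = pvNmax (u.take (i+1)) := by
    intro i hi
    rw [show ([x0] ++ pvG x0 vs) = x0 :: pvG x0 vs from rfl,
        pvG_getD vs x0 i (by omega)]
    have hut' : u.take (i+1) = t.take (i+1) := by
      rw [hu, List.take_append_of_le_length (by omega), List.take_take,
          min_eq_left (by omega)]
    rw [hvsEq, ← List.map_take, List.take_range, min_eq_left (by omega), hut', hx0,
        PySem.List.pyGetD_zero, pvPrefEl t i (by omega)]
  have hmfrel : ∀ i : Nat, i < k →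
      (([last'] ++ pvG last' vsR).reverse).getD (i+1) 0 = pvNmax (u.drop (i+1)) := by
    intro i hi
    have hlen0 : ([last'] ++ pvG last' vsR).length = k + 1 := by
      simp [pvG_length, hvsRlen]
    rw [List.getD_reverse (i+1) (by omega),
        show ([last'] ++ pvG last' vsR).length - 1 - (i+1) = k - i - 1 from by omega,
        show ([last'] ++ pvG last' vsR) = last' :: pvG last' vsR from rfl,
        pvG_getD vsR last' (k - i - 1) (by omega),
        hvsR, List.take_reverse,
        show (t.take k).length - (k - i - 1) = i + 1 from by rw [htklen]; omega,
        pvFoldlMax_reverse, pvFoldlMax_append_singleton,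
        hu, List.drop_append_of_le_length (by rw [htklen]; omega)]
  -- counting loop
  rw [pvCountFold (fun i => PySem.List.pyGetD ([x0] ++ pvG x0 vs) i 0)
      (fun i => PySem.List.pyGetD (([last'] ++ pvG last' vsR).reverse) (i+1) 0)]
  rw [show (N - 1 : Int) = (k : Int) from hkN.symm]
  rw [PySem.List.pyRange_zero_nat k, List.countP_map, List.countP_map]
  have hcover : ∀ j : Nat, j < k →
      max (pvNmax (u.take (j+1))) (pvNmax (u.drop (j+1))) = pvNmax u := by
    intro j hj
    conv_rhs => rw [← List.take_append_drop (j+1) u]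
    rw [pvNmax_append _ _ (by simp [List.take_eq_nil_iff, hune])
      (by simp [List.drop_eq_nil_iff, hulen]; omega)]
  have hRcount : List.countP
      ((fun i => decide (PySem.List.pyGetD (([last'] ++ pvG last' vsR).reverse) (i+1) 0 <
          PySem.List.pyGetD ([x0] ++ pvG x0 vs) i 0)) ∘ (fun j : Nat => (j : Int)))
      (List.range k) = pvCntR u := by
    rw [pvCntR_shift u k hulen]
    apply List.countP_congr
    intro j hj
    have hj' : j < k := List.mem_range.mp hj
    simp only [Function.comp_apply, decide_eq_true_eq]
    rw [show ((j : Int) + 1) = (((j + 1 : Nat)) : Int) from by push_cast; ring,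
        PySem.List.pyGetD_natCast, PySem.List.pyGetD_natCast,
        hmflel j hj', hmfrel j hj']
    exact (pvCmp _ _ _ (hcover j hj')).1
  have hLcount : List.countP
      ((fun i => decide (PySem.List.pyGetD ([x0] ++ pvG x0 vs) i 0 <
          PySem.List.pyGetD (([last'] ++ pvG last' vsR).reverse) (i+1) 0)) ∘ (fun j : Nat => (j : Int)))
      (List.range k) = pvCntL u := by
    rw [pvCntL_shift u k hulen]
    apply List.countP_congr
    intro j hj
    have hj' : j < k := List.mem_range.mp hj
    simp only [Function.comp_apply, decide_eq_true_eq]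
    rw [show ((j : Int) + 1) = (((j + 1 : Nat)) : Int) from by push_cast; ring,
        PySem.List.pyGetD_natCast, PySem.List.pyGetD_natCast,
        hmflel j hj', hmfrel j hj']
    exact (pvCmp _ _ _ (hcover j hj')).2
  rw [hRcount, hLcount]
  -- B's single pass
  have hB := pvAltB t N k u last' hkN hkl hu
  rw [← hkN] at hB
  rw [hB]
  norm_num
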